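-- pv_equiv track=rewrite | github.com/Kowshika-builds/flames_game | flames.py | flames
-- ===== SOURCE A (Python) =====
-- def flames(remaining_count):
--     c = 0
--     a = {'F': True, 'L': True, 'A': True, 'M': True, 'E': True, 'S': True}
--     b = remaining_count
--
--     while sum(a.values()) > 1:
--         for i in a:
--             if a[i]:
--                 c += 1
--                 if c == b:
--                     a[i] = False
--                     c = 0
--
--     for key, value in a.items():
--         if value:
--             return key
-- ===== SOURCE B (Python) =====
-- def flames(remaining_count):
--     pos = 0
--     for m in range(2, 7):
--         pos = (pos + remaining_count) % m
--     return "FLAMES"[pos]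
-- ===== Notes on version B (the rewrite author's own statement) =====
-- stated objective: faster
-- what changed: Replaces the O(b) step-by-step elimination simulation over a 6-entry dict with the closed-form Josephus recurrence pos=(pos+b)%m for m=2..6, then indexes 'FLAMES'.
-- outside the precondition, e.g. on flames(1): A returns None, B returns 'S'; on flames(0): A does not finish within the time limit, B returns 'F'
import Mathlib
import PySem

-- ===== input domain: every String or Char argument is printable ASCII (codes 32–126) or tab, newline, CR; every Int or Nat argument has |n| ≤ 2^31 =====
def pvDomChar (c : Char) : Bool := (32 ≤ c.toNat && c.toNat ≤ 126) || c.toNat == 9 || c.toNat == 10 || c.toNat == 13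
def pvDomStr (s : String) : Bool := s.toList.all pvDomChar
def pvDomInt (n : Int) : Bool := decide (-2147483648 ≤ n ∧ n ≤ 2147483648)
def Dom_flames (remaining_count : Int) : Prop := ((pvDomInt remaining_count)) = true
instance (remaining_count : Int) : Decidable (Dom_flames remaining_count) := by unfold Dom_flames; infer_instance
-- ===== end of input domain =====

-- B replaces A's O(b) one-by-one elimination simulation by the O(1) Josephus recurrence
-- pos := (pos + b) % m for m = 2..6; equivalence is proved on Pre_ (2 ≤ b).

-- ===== PORT A =====
def flamesDict0 : PySem.Dict Char Bool :=
  PySem.Dict.ofList [('F',true),('L',true),('A',true),('M',true),('E',true),('S',true)]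

-- sum(a.values())  (Python True counts as 1)
def flamesLiveSum (d : PySem.Dict Char Bool) : Int :=
  (PySem.Dict.values d).foldl (fun s v => s + (if v then 1 else 0)) 0

-- one execution of "for i in a: ..." (keys are never added/removed, so the
-- iteration order is the fixed key list of the dict)
def flamesPass (b : Int) (st : PySem.Dict Char Bool × Int) : PySem.Dict Char Bool × Int :=
  (PySem.Dict.keys st.1).foldl (fun st i =>
    if PySem.Dict.getD st.1 i false then
      if st.2 + 1 = b then (PySem.Dict.insert st.1 i false, 0) else (st.1, st.2 + 1)
    else st) st

-- the while loop; the fuel 3*b+12 is proved sufficient for every b admitted by Pre_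
-- (for b ≥ 7 in lemma flamesLoop_eq_loopM below, for 2 ≤ b ≤ 66 by decide)
def flamesLoop : Nat → Int → PySem.Dict Char Bool × Int → PySem.Dict Char Bool
  | 0, _, st => st.1
  | f+1, b, st => if flamesLiveSum st.1 > 1 then flamesLoop f b (flamesPass b st) else st.1

def flames (remaining_count : Int) : String :=
  let d := flamesLoop (3 * remaining_count.toNat + 12) remaining_count (flamesDict0, 0)
  -- final "for key, value in a.items(): if value: return key"
  match List.find? (fun p => p.2) (PySem.Dict.items d) with
  | some p => String.ofList [p.1]
  | none => ""   -- unreachable under Pre_ (Python would fall through returning None)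

-- ===== PORT B =====
def flames_alt (remaining_count : Int) : String :=
  let pos := (PySem.List.pyRange 2 7 1).foldl
    (fun pos m => PySem.Int.mod (pos + remaining_count) m) 0
  match PySem.Str.pyGet? "FLAMES" pos with
  | some ch => String.ofList [ch]
  | none => ""   -- unreachable: pos = _ % 6 ∈ [0,6)

-- ===== PRECONDITION & SPEC =====
-- Pre_ excludes b ≤ 0 (A's while loop never terminates: c only ever equals b after
-- b ≥ 1 increments) and b = 1 (A eliminates all six letters in the first pass and
-- falls off the final loop returning None, which is not a String; B returns 'S').
def Pre_flames (remaining_count : Int) : Prop := 2 ≤ remaining_count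
instance (remaining_count : Int) : Decidable (Pre_flames remaining_count) := by
  unfold Pre_flames; infer_instance
def pvWitness_flames : Int := 7

def Spec_flames (remaining_count : Int) (out : String) : Prop := out = flames_alt remaining_count
instance (remaining_count : Int) (out : String) : Decidable (Spec_flames remaining_count out) := by
  unfold Spec_flames; infer_instance

-- ===== CLAIM (what is proved, stated in full; the proofs are below) =====
def Claim_equal_flames : Prop := ∀ (remaining_count : Int), Dom_flames remaining_count →
  Pre_flames remaining_count → Spec_flames remaining_count (flames remaining_count)

-- ===== LEMMAS AND PROOFS =====

-- live letters (in dict order) of an association list state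
def liveOf (l : List (Char × Bool)) : List Char := (l.filter (fun p => p.2)).map Prod.fst

-- positional description of one pass
def passList (b : Int) : List (Char × Bool) → Int → List (Char × Bool) × Int
  | [], c => ([], c)
  | (k,v) :: rest, c =>
    if v then
      if c + 1 = b then
        let r := passList b rest 0
        ((k,false) :: r.1, r.2)
      else
        let r := passList b rest (c+1)
        ((k,v) :: r.1, r.2)
    else
      let r := passList b rest c
      ((k,v) :: r.1, r.2)

-- mid-level Josephus model: with m live letters and counter c, the next
-- eliminated letter is the ((b-c-1) mod m)-th live one, and the counter restarts
-- at the number of live letters after it.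
def loopM (b : Int) (live : List Char) (c : Int) : List Char :=
  if live.length ≤ 1 then live
  else
    let m : Int := live.length
    let j : Nat := ((b - c - 1) % m).toNat
    loopM b (live.eraseIdx j) ((m : Int) - 1 - (j : Int))
termination_by live.length
decreasing_by
  have hm : (0:Int) < (live.length : Int) := by
    simp only [not_le] at *; exact_mod_cast by omega
  have h1 : (0:Int) ≤ (b - c - 1) % (live.length : Int) := Int.emod_nonneg _ (by omega)
  have h2 : (b - c - 1) % (live.length : Int) < (live.length : Int) := Int.emod_lt_of_pos _ hm
  have hj : ((b - c - 1) % (live.length : Int)).toNat < live.length := by omega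
  simp [List.length_eraseIdx, hj]
  omega

lemma foldl_boolSum (vs : List Bool) (s : Int) :
    vs.foldl (fun s v => s + (if v then 1 else 0)) s = s + (vs.filter (fun v => v)).length := by
  induction vs generalizing s with
  | nil => simp
  | cons v vs ih => cases v <;> simp [ih] <;> omega

lemma liveSum_eq (l : List (Char × Bool)) :
    flamesLiveSum (PySem.Dict.mk l) = ((liveOf l).length : Int) := by
  have : PySem.Dict.values (PySem.Dict.mk l) = l.map Prod.snd := by
    simp [PySem.Dict.values_mk]
  simp [flamesLiveSum, this, foldl_boolSum, liveOf, List.filter_map]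
  rfl

lemma getD_mk_middle (pre rest : List (Char × Bool)) (k : Char) (v : Bool)
    (h : ((pre ++ (k,v) :: rest).map Prod.fst).Nodup) :
    PySem.Dict.getD (PySem.Dict.mk (pre ++ (k,v) :: rest)) k false = v := by
  apply PySem.Dict.getD_of_mem_items
  · simp
  · simpa [PySem.Dict.keys] using h

lemma insert_mk_middle (pre rest : List (Char × Bool)) (k : Char) (v w : Bool)
    (h : ((pre ++ (k,v) :: rest).map Prod.fst).Nodup) :
    PySem.Dict.insert (PySem.Dict.mk (pre ++ (k,v) :: rest)) k w
      = PySem.Dict.mk (pre ++ (k,w) :: rest) := by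
  rw [List.map_append, List.nodup_append] at h
  obtain ⟨h1, h2, hdisj⟩ := h
  have hpre : ∀ p ∈ pre, p.1 ≠ k := by
    intro p hp hk
    have := hdisj p.1 (List.mem_map_of_mem hp)
    simp [hk] at this
  have hrest : ∀ p ∈ rest, p.1 ≠ k := by
    intro p hp hk
    rw [List.map_cons, List.nodup_cons] at h2
    have : p.1 ∈ List.map Prod.fst rest := List.mem_map_of_mem hp
    rw [hk] at this
    exact h2.1 this
  have hc : PySem.Dict.contains (PySem.Dict.mk (pre ++ (k,v) :: rest)) k = true := by
    rw [PySem.Dict.contains_iff_mem_keys]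
    simp [PySem.Dict.keys]
  apply PySem.Dict.ext
  rw [PySem.Dict.items_insert_of_contains _ _ hc]
  show (pre ++ (k,v) :: rest).map _ = _
  rw [List.map_append, List.map_cons]
  congr 1
  · calc pre.map (fun p => if (p.1 == k) = true then (k, w) else p)
        = pre.map id := List.map_congr_left (by intro p hp; simp [hpre p hp])
      _ = pre := List.map_id _
  · congr 1
    · simp
    · calc rest.map (fun p => if (p.1 == k) = true then (k, w) else p)
          = rest.map id := List.map_congr_left (by intro p hp; simp [hrest p hp])
        _ = rest := List.map_id _

lemma passL (b : Int) (l : List (Char × Bool)) : ∀ (pre : List (Char × Bool)) (c : Int),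
    ((pre ++ l).map Prod.fst).Nodup →
    (l.map Prod.fst).foldl (fun st i =>
      if PySem.Dict.getD st.1 i false then
        if st.2 + 1 = b then (PySem.Dict.insert st.1 i false, 0) else (st.1, st.2 + 1)
      else st) (PySem.Dict.mk (pre ++ l), c)
    = (PySem.Dict.mk (pre ++ (passList b l c).1), (passList b l c).2) := by
  induction l with
  | nil => intro pre c h; simp [passList]
  | cons p rest ih =>
    intro pre c h
    obtain ⟨k, v⟩ := p
    rw [List.map_cons, List.foldl_cons]
    simp only [getD_mk_middle pre rest k v h]
    cases v with
    | false =>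
      simp only [if_false, Bool.false_eq_true]
      have := ih (pre ++ [(k, false)]) c (by simpa using h)
      simp only [List.append_assoc, List.singleton_append] at this
      rw [this]
      simp [passList]
    | true =>
      simp only [if_true]
      by_cases hb : c + 1 = b
      · rw [if_pos hb, insert_mk_middle pre rest k true false h]
        have := ih (pre ++ [(k, false)]) 0 (by simpa using h)
        simp only [List.append_assoc, List.singleton_append] at this
        rw [this]
        simp [passList, hb]
      · rw [if_neg hb]
        have := ih (pre ++ [(k, true)]) (c+1) (by simpa using h)
        simp only [List.append_assoc, List.singleton_append] at this
        rw [this]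
        simp [passList, hb]

lemma flamesPass_eq (b : Int) (l : List (Char × Bool)) (c : Int)
    (h : (l.map Prod.fst).Nodup) :
    flamesPass b (PySem.Dict.mk l, c)
      = (PySem.Dict.mk (passList b l c).1, (passList b l c).2) := by
  have := passL b l [] c (by simpa using h)
  simpa [flamesPass, PySem.Dict.keys] using this

lemma passList_keys (b : Int) (l : List (Char × Bool)) : ∀ (c : Int),
    (passList b l c).1.map Prod.fst = l.map Prod.fst := by
  induction l with
  | nil => intro c; simp [passList]
  | cons p rest ih =>
    intro c
    obtain ⟨k, v⟩ := p
    cases v <;> simp only [passList] <;> split_ifs <;> simp [ih]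

lemma passList_noelim (b : Int) (l : List (Char × Bool)) : ∀ (c : Int),
    0 ≤ c → c + ((liveOf l).length : Int) < b →
    passList b l c = (l, c + ((liveOf l).length : Int)) := by
  induction l with
  | nil => intro c _ _; simp [passList, liveOf]
  | cons p rest ih =>
    intro c hc h
    obtain ⟨k, v⟩ := p
    cases v with
    | false =>
      simp only [passList, if_false, Bool.false_eq_true]
      rw [ih c hc (by simpa [liveOf] using h)]
      simp [liveOf]
    | true =>
      have hlive : ((liveOf ((k,true) :: rest)).length : Int)
          = ((liveOf rest).length : Int) + 1 := by simp [liveOf]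
      simp only [passList, if_true]
      rw [if_neg (by omega), ih (c+1) (by omega) (by omega)]
      simp [liveOf]
      omega

lemma passList_elim (b : Int) (l : List (Char × Bool)) : ∀ (c : Int),
    7 ≤ b → 0 ≤ c → c < b → b ≤ c + ((liveOf l).length : Int) →
    (liveOf l).length ≤ 6 →
    liveOf (passList b l c).1 = (liveOf l).eraseIdx (b - c - 1).toNat
    ∧ (passList b l c).2 = c + ((liveOf l).length : Int) - b
    ∧ ((liveOf (passList b l c).1).length : Int) = ((liveOf l).length : Int) - 1 := by
  induction l with
  | nil => intro c _ _ _ h2 _; simp [liveOf] at h2; omega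
  | cons p rest ih =>
    intro c hb hc h1 h2 hT
    obtain ⟨k, v⟩ := p
    cases v with
    | false =>
      have e : liveOf ((k,false) :: rest) = liveOf rest := by simp [liveOf]
      simp only [passList, if_false, Bool.false_eq_true]
      have := ih c hb hc h1 (by simpa [e] using h2) (by simpa [e] using hT)
      simpa [liveOf, e] using this
    | true =>
      have e : liveOf ((k,true) :: rest) = k :: liveOf rest := by simp [liveOf]
      by_cases hbc : c + 1 = b
      · simp only [passList, if_true, if_pos hbc]
        have hmr : ((liveOf rest).length : Int) < b := by simp [e] at hT; omega
        have e' : ((liveOf ((k,true) :: rest)).length : Int) = ((liveOf rest).length : Int) + 1 := by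
          simp [e]
        rw [passList_noelim b rest 0 le_rfl (by omega)]
        have ht0 : (b - c - 1).toNat = 0 := by omega
        refine ⟨?_, ?_, ?_⟩
        · simp [liveOf, e, ht0]
        · simp [liveOf, e]; omega
        · simp [liveOf, e]
      · simp only [passList, if_true, if_neg hbc]
        have hrec := ih (c+1) hb (by omega) (by omega) (by simp [e] at h2 ⊢; omega)
          (by simp [e] at hT ⊢; omega)
        obtain ⟨e1, e2, e3⟩ := hrec
        have ht : (b - c - 1).toNat = (b - (c+1) - 1).toNat + 1 := by omega
        refine ⟨?_, ?_, ?_⟩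
        · simp [liveOf] at e1 ⊢
          have hn : (b - c).toNat - 1 = ((b - (c+1)).toNat - 1) + 1 := by omega
          rw [hn, List.eraseIdx_cons_succ, e1]
        · simp [liveOf] at e2 ⊢; omega
        · simp [liveOf] at e3 ⊢; omega

lemma loopM_shift (b : Int) (live : List Char) (c : Int)
    (h : c + (live.length : Int) < b) :
    loopM b live (c + (live.length : Int)) = loopM b live c := by
  conv_lhs => rw [loopM]
  conv_rhs => rw [loopM]
  by_cases hl : live.length ≤ 1
  · simp [hl]
  · simp only [hl, if_false]
    have he : (b - (c + (live.length : Int)) - 1) % (live.length : Int)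
         = (b - c - 1) % (live.length : Int) := by
      have := Int.sub_emod_right (b - c - 1) (live.length : Int)
      rw [show b - (c + (live.length : Int)) - 1 = (b - c - 1) - (live.length : Int) by ring]
      exact this
    rw [he]

lemma flamesLoop_eq_loopM (f : Nat) : ∀ (l : List (Char × Bool)) (b c : Int),
    (l.map Prod.fst).Nodup → 7 ≤ b → 0 ≤ c → c < b → (liveOf l).length ≤ 6 →
    (b - c + 1)/2 + (((liveOf l).length : Int) - 2)*((b+1)/2 + 1) + 3 ≤ (f : Int) →
    liveOf (PySem.Dict.items (flamesLoop f b (PySem.Dict.mk l, c))) = loopM b (liveOf l) c := by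
  induction f with
  | zero =>
    intro l b c hnd hb hc hcb hT hfuel
    have hT1 : (liveOf l).length ≤ 1 := by
      by_contra hcon
      have h2 : (2:Int) ≤ ((liveOf l).length : Int) := by omega
      have hp : (0:Int) ≤ (((liveOf l).length : Int) - 2)*((b+1)/2 + 1) :=
        mul_nonneg (by omega) (by omega)
      simp only [Nat.cast_zero] at hfuel
      omega
    rw [loopM, if_pos hT1]
    rfl
  | succ f ih =>
    intro l b c hnd hb hc hcb hT hfuel
    rw [show flamesLoop (f+1) b (PySem.Dict.mk l, c)
        = (if flamesLiveSum (PySem.Dict.mk l) > 1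
           then flamesLoop f b (flamesPass b (PySem.Dict.mk l, c))
           else PySem.Dict.mk l) from rfl]
    rw [liveSum_eq]
    by_cases hT1 : (liveOf l).length ≤ 1
    · rw [if_neg (by omega), loopM, if_pos hT1]
    · push_neg at hT1
      have hT2 : (2:Int) ≤ ((liveOf l).length : Int) := by omega
      rw [if_pos (by omega)]
      rw [flamesPass_eq b l c hnd]
      have hX : (4:Int) ≤ (b+1)/2 + 1 := by omega
      by_cases he : c + ((liveOf l).length : Int) < b
      · rw [passList_noelim b l c hc he]
        rw [ih l b (c + ((liveOf l).length : Int)) hnd hb (by omega) (by omega) hT ?_]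
        · exact loopM_shift b (liveOf l) c he
        · generalize hP : (((liveOf l).length : Int) - 2)*((b+1)/2 + 1) = P at hfuel ⊢
          push_cast at hfuel ⊢
          omega
      · push_neg at he
        obtain ⟨e1, e2, e3⟩ := passList_elim b l c hb hc hcb he hT
        have hr0 : 0 ≤ (passList b l c).2 := by omega
        have hr1 : (passList b l c).2 < b := by omega
        have hT' : (liveOf (passList b l c).1).length ≤ 6 := by omega
        rw [ih (passList b l c).1 b (passList b l c).2
              (by rw [passList_keys]; exact hnd) hb hr0 hr1 hT' ?_]
        · conv_rhs => rw [loopM]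
          rw [if_neg (by omega)]
          have hj : (b - c - 1) % ((liveOf l).length : Int) = b - c - 1 :=
            Int.emod_eq_of_lt (by omega) (by omega)
          simp only [hj]
          rw [e1]
          congr 1
          omega
        · have hsplit : (((liveOf l).length : Int) - 2)*((b+1)/2 + 1)
              = (((liveOf (passList b l c).1).length : Int) - 2)*((b+1)/2 + 1) + ((b+1)/2 + 1) := by
            rw [e3]; ring
          rw [hsplit] at hfuel
          generalize hP : (((liveOf (passList b l c).1).length : Int) - 2)*((b+1)/2 + 1) = P at hfuel ⊢
          push_cast at hfuel ⊢
          omega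

lemma find?_snd (l : List (Char × Bool)) :
    (List.find? (fun p => p.2) l).map Prod.fst = (liveOf l).head? := by
  induction l with
  | nil => rfl
  | cons p rest ih =>
    obtain ⟨k, v⟩ := p
    cases v <;> simp [liveOf, List.find?] at ih ⊢ <;> simp [ih]

lemma flames_eq_head (b : Int) (hb : 7 ≤ b) :
    flames b = (match (loopM b ['F','L','A','M','E','S'] 0).head? with
                | some k => String.ofList [k]
                | none => "") := by
  have hd0 : flamesDict0 = PySem.Dict.mk
      [('F',true),('L',true),('A',true),('M',true),('E',true),('S',true)] := by decide
  have hmap : ∀ (o : Option (Char × Bool)),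
      (match o with | some p => String.ofList [p.1] | none => "")
      = (match o.map Prod.fst with | some k => String.ofList [k] | none => "") := by
    intro o; cases o <;> rfl
  have hfuel : (b - 0 + 1)/2
      + (((liveOf [('F',true),('L',true),('A',true),('M',true),('E',true),('S',true)]).length : Int) - 2)*((b+1)/2 + 1) + 3
      ≤ ((3*b.toNat+12 : Nat) : Int) := by
    have hc : ((3*b.toNat+12 : Nat) : Int) = 3*b + 12 := by push_cast; omega
    rw [hc]
    simp only [liveOf, List.filter, List.map, List.length]
    norm_num
    omega
  have hbr := flamesLoop_eq_loopM (3*b.toNat+12)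
      [('F',true),('L',true),('A',true),('M',true),('E',true),('S',true)] b 0
      (by decide) hb le_rfl (by omega) (by decide) hfuel
  unfold flames
  rw [hd0, hmap, find?_snd, hbr]
  rfl

lemma loopM_period (b : Int) : ∀ (n : Nat) (live : List Char) (c : Int),
    live.length = n → live.length ≤ 6 →
    loopM (b + 60) live c = loopM b live c := by
  intro n
  induction n using Nat.strong_induction_on with
  | _ n ih =>
    intro live c hn h6
    conv_lhs => rw [loopM]
    conv_rhs => rw [loopM]
    by_cases hl : live.length ≤ 1
    · simp [hl]
    · simp only [hl, if_false]
      have hm2 : 2 ≤ live.length := by omega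
      have hdvd : (live.length : Int) ∣ 60 := by
        have h5 : live.length = 2 ∨ live.length = 3 ∨ live.length = 4 ∨
            live.length = 5 ∨ live.length = 6 := by omega
        rcases h5 with h|h|h|h|h <;> rw [h] <;> decide
      have hj : (b + 60 - c - 1) % (live.length : Int) = (b - c - 1) % (live.length : Int) := by
        obtain ⟨k, hk⟩ := hdvd
        rw [show b + 60 - c - 1 = (b - c - 1) + (live.length : Int) * k by omega]
        exact Int.add_mul_emod_self_left (a := b - c - 1) (b := (live.length : Int)) (c := k)
      rw [hj]
      have hjlt : ((b - c - 1) % (live.length : Int)).toNat < live.length := by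
        have h1 := Int.emod_nonneg (b - c - 1) (by omega : (live.length : Int) ≠ 0)
        have h2 := Int.emod_lt_of_pos (b - c - 1) (by omega : (0:Int) < (live.length : Int))
        omega
      have hlen : (live.eraseIdx ((b - c - 1) % (live.length : Int)).toNat).length = n - 1 := by
        simp [List.length_eraseIdx, hjlt]
        omega
      exact ih (n-1) (by omega) _ _ hlen (by omega)

lemma alt_period (b : Int) : flames_alt (b - 60) = flames_alt b := by
  unfold flames_alt
  have hr : PySem.List.pyRange 2 7 1 = [2,3,4,5,6] := by decide
  simp only [hr, List.foldl_cons, List.foldl_nil, PySem.Int.mod, Int.fmod_eq_emod]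
  norm_num
  have e1 : (b - 60) % 2 = b % 2 := by omega
  rw [e1]
  generalize b % 2 = x1
  have e2 : (x1 + (b - 60)) % 3 = (x1 + b) % 3 := by omega
  rw [e2]
  generalize (x1 + b) % 3 = x2
  have e3 : (x2 + (b - 60)) % 4 = (x2 + b) % 4 := by omega
  rw [e3]
  generalize (x2 + b) % 4 = x3
  have e4 : (x3 + (b - 60)) % 5 = (x3 + b) % 5 := by omega
  rw [e4]
  generalize (x3 + b) % 5 = x4
  have e5 : (x4 + (b - 60)) % 6 = (x4 + b) % 6 := by omega
  rw [e5]

lemma flames_base : ∀ b : Int, 2 ≤ b → b ≤ 66 → flames b = flames_alt b := by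
  intro b h1 h2
  interval_cases b <;> decide

lemma flames_main : ∀ (n : Nat) (b : Int), 2 ≤ b → (b - 2).toNat = n →
    flames b = flames_alt b := by
  intro n
  induction n using Nat.strong_induction_on with
  | _ n ih =>
    intro b h2 hn
    by_cases hb : b ≤ 66
    · exact flames_base b h2 hb
    · push_neg at hb
      have h7 : (7:Int) ≤ b - 60 := by omega
      have e1 : flames b = flames (b - 60) := by
        rw [flames_eq_head b (by omega), flames_eq_head (b - 60) h7]
        conv_lhs => rw [show b = (b - 60) + 60 by ring]
        rw [loopM_period (b - 60) 6 _ 0 (by simp) (by simp)]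
      rw [e1, ih (b - 60 - 2).toNat (by omega) (b - 60) (by omega) rfl, alt_period]

-- ===== VERDICT (by name: the statement is the Claim_ definition above) =====
theorem flames_spec : Claim_equal_flames := by
  intro b _ hpre
  unfold Spec_flames
  exact flames_main (b - 2).toNat b hpre rfl
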